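-- pv_equiv track=rewrite | github.com/Andy160675/SanctuarySovereignSystems | genesis/phase6/shadow_metric_v0.py | verify_closure_sequence
-- ===== SOURCE A (Python) =====
-- REQUIRED_LEDGER_EVENTS = [
--     "METRIC_DEFINITION_ANCHORED",
--     "SHADOW_METRIC_DEPLOYED",
--     "GOODHART_DIV_GATE_ARMED",
--     "SYNTHETIC_GOODHART_ATTACK_LAUNCHED",
--     "GOODHART_DIVERGENCE_DETECTED",
--     "FEATURE_FREEZE_EXECUTED",
--     "7956_TRIGGERED",
-- ]
--
-- def verify_closure_sequence(ledger_events: list) -> bool: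
--     """
--     Verify all required events appear in correct causal order.
--     All seven must appear within one block window.
--     """
--     event_indices = {}
--     for i, event in enumerate(ledger_events):
--         event_type = event.get("event_type", "")
--         if event_type in REQUIRED_LEDGER_EVENTS:
--             if event_type not in event_indices:
--                 event_indices[event_type] = i
--
--     # Check all events present
--     if len(event_indices) != len(REQUIRED_LEDGER_EVENTS):
--         return False
--
--     # Check causal order
--     for i in range(len(REQUIRED_LEDGER_EVENTS) - 1):
--         current = REQUIRED_LEDGER_EVENTS[i]
--         next_evt = REQUIRED_LEDGER_EVENTS[i + 1]
--         if event_indices.get(current, -1) >= event_indices.get(next_evt, 0):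
--             return False
--
--     return True
-- ===== SOURCE B (Python) =====
-- REQUIRED_LEDGER_EVENTS = [
--     "METRIC_DEFINITION_ANCHORED",
--     "SHADOW_METRIC_DEPLOYED",
--     "GOODHART_DIV_GATE_ARMED",
--     "SYNTHETIC_GOODHART_ATTACK_LAUNCHED",
--     "GOODHART_DIVERGENCE_DETECTED",
--     "FEATURE_FREEZE_EXECUTED",
--     "7956_TRIGGERED",
-- ]
--
-- def verify_closure_sequence(ledger_events: list) -> bool:
--     # For each required type, find the index of its first appearance in the
--     # ledger; missing type -> False.  Then the sequence is correct iff these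
--     # first-appearance indices are strictly increasing.
--     firsts = []
--     for t in REQUIRED_LEDGER_EVENTS:
--         for i, event in enumerate(ledger_events):
--             if event.get("event_type", "") == t:
--                 firsts.append(i)
--                 break
--         else:
--             return False
--     return all(a < b for a, b in zip(firsts, firsts[1:]))
-- ===== Notes on version B (the rewrite author's own statement) =====
-- stated objective: simpler
-- what changed: Replaces the enumerate pass that builds a first-index dict plus the separate pairwise ordering loop over the dict with a per-required-type first-occurrence scan collecting a list of indices, checked strictly increasing with one zip/all; no dict and no length check.
import Mathlib
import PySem

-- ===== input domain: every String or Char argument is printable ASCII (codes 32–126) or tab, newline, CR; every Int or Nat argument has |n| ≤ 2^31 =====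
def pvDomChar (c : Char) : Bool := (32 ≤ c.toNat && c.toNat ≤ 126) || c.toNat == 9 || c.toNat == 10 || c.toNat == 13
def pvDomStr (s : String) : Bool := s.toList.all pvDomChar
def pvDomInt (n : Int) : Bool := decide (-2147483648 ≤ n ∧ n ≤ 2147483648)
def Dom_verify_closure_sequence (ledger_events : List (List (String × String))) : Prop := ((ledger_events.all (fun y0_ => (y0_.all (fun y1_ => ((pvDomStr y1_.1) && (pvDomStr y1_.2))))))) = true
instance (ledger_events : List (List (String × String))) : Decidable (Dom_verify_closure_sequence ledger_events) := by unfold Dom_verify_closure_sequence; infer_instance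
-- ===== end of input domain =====

-- B replaces A's first-index dict plus pairwise ordering loop by a per-required-type
-- first-occurrence scan and one strictly-increasing check (simpler decomposition, same cost class).

-- module constant REQUIRED_LEDGER_EVENTS (shared by both Pythons)
def pvREQUIRED : List String :=
  ["METRIC_DEFINITION_ANCHORED",
   "SHADOW_METRIC_DEPLOYED",
   "GOODHART_DIV_GATE_ARMED",
   "SYNTHETIC_GOODHART_ATTACK_LAUNCHED",
   "GOODHART_DIVERGENCE_DETECTED",
   "FEATURE_FREEZE_EXECUTED",
   "7956_TRIGGERED"]

-- event.get("event_type", "") — dict.get on the event, first match (used by both sources)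
def pvEventType (event : List (String × String)) : String :=
  match event.find? (fun p => p.1 == "event_type") with
  | some p => p.2
  | none => ""

-- ===== PORT A =====
-- loop body of A's first pass: insert first index of each required type
def pvAStep (d : PySem.Dict String Int) (p : Int × List (String × String)) : PySem.Dict String Int :=
  let event_type := pvEventType p.2
  if pvREQUIRED.contains event_type then
    if !(d.contains event_type) then d.insert event_type p.1 else d
  else d

def verify_closure_sequence (ledger_events : List (List (String × String))) : Bool :=
  let event_indices := (PySem.List.enumerate ledger_events).foldl pvAStep PySem.Dict.empty
  if event_indices.size ≠ pvREQUIRED.length then false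
  else
    -- 'for i in range(len(REQUIRED)-1): if ... : return False' as an all-loop
    (PySem.List.pyRange 0 ((pvREQUIRED.length : Int) - 1) 1).all (fun i =>
      let current := (PySem.List.pyGet? pvREQUIRED i).getD ""      -- index always in range here
      let next_evt := (PySem.List.pyGet? pvREQUIRED (i + 1)).getD ""
      !(event_indices.getD current (-1) ≥ event_indices.getD next_evt 0))

-- ===== PORT B =====
-- inner scan of B: index of the first event of type t, counting from n
def pvFindFirst (t : String) : List (List (String × String)) → Int → Option Int
  | [], _ => none
  | e :: rest, n => if pvEventType e == t then some n else pvFindFirst t rest (n + 1)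

-- outer loop of B: collect first indices in REQUIRED order; none = early 'return False'
def pvFirsts (ledger_events : List (List (String × String))) : List String → Option (List Int)
  | [] => some []
  | t :: ts =>
    match pvFindFirst t ledger_events 0 with
    | none => none
    | some i => (pvFirsts ledger_events ts).map (fun fs => i :: fs)

def verify_closure_sequence_alt (ledger_events : List (List (String × String))) : Bool :=
  match pvFirsts ledger_events pvREQUIRED with
  | none => false
  | some firsts => (firsts.zip firsts.tail).all (fun p => p.1 < p.2)

-- ===== PRECONDITION & SPEC =====
def Spec_verify_closure_sequence (ledger_events : List (List (String × String))) (out : Bool) : Prop := out = verify_closure_sequence_alt ledger_events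
instance (ledger_events : List (List (String × String))) (out : Bool) : Decidable (Spec_verify_closure_sequence ledger_events out) := by unfold Spec_verify_closure_sequence; infer_instance

-- ===== CLAIM (what is proved, stated in full; the proofs are below) =====
def Claim_equal_verify_closure_sequence : Prop := ∀ (ledger_events : List (List (String × String))), Dom_verify_closure_sequence ledger_events → Spec_verify_closure_sequence ledger_events (verify_closure_sequence ledger_events)

-- ===== LEMMAS AND PROOFS =====

theorem foldA_get (t : String) :
    ∀ (L : List (List (String × String))) (d : PySem.Dict String Int) (n : Int),
    ((PySem.List.enumerate L n).foldl pvAStep d).get? t =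
      Option.or (d.get? t) (if t ∈ pvREQUIRED then pvFindFirst t L n else none) := by
  intro L
  induction L with
  | nil => intro d n; simp [PySem.List.enumerate_nil, pvFindFirst]
  | cons e L ih =>
    intro d n
    rw [PySem.List.enumerate_cons, List.foldl_cons, ih]
    have hstep : pvFindFirst t (e :: L) n
        = if pvEventType e == t then some n else pvFindFirst t L (n + 1) := rfl
    rw [hstep]
    by_cases hreq : (pvREQUIRED.contains (pvEventType e) : Bool)
    · by_cases hcont : (d.contains (pvEventType e) : Bool)
      · have hd : pvAStep d (n, e) = d := by unfold pvAStep; simp [hcont]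
        rw [hd]
        by_cases het : pvEventType e = t
        · subst het
          have hsome : (d.get? (pvEventType e)).isSome := by
            rw [← PySem.Dict.contains_eq_isSome_get?]; exact hcont
          obtain ⟨v, hv⟩ := Option.isSome_iff_exists.mp hsome
          simp [hv, Option.or]
        · simp [beq_eq_false_iff_ne.mpr het]
      · rw [Bool.not_eq_true] at hcont
        have hmem : pvEventType e ∈ pvREQUIRED := by simpa using hreq
        have hd : pvAStep d (n, e) = d.insert (pvEventType e) n := by
          unfold pvAStep; simp [hmem, hcont]
        rw [hd]
        by_cases het : pvEventType e = t
        · subst het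
          have hnone : d.get? (pvEventType e) = none := by
            rw [PySem.Dict.get?_eq_none_iff_contains]; exact hcont
          have htreq : pvEventType e ∈ pvREQUIRED := by
            simpa using hreq
          simp [PySem.Dict.get?_insert_self, hnone, htreq, Option.or]
        · rw [PySem.Dict.get?_insert_of_ne _ _ (fun h => het h.symm)]
          simp [beq_eq_false_iff_ne.mpr het]
    · rw [Bool.not_eq_true] at hreq
      have hmem : pvEventType e ∉ pvREQUIRED := by simpa using hreq
      have hd : pvAStep d (n, e) = d := by unfold pvAStep; simp [hmem]
      rw [hd]
      by_cases ht : t ∈ pvREQUIRED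
      · have het : pvEventType e ≠ t := by
          intro h; rw [h] at hmem; exact hmem ht
        simp [ht, beq_eq_false_iff_ne.mpr het]
      · simp [ht]

theorem foldA_nodup :
    ∀ (L : List (List (String × String))) (d : PySem.Dict String Int) (n : Int),
    d.keys.Nodup → ((PySem.List.enumerate L n).foldl pvAStep d).keys.Nodup := by
  intro L
  induction L with
  | nil => intro d n h; simpa [PySem.List.enumerate_nil] using h
  | cons e L ih =>
    intro d n h
    rw [PySem.List.enumerate_cons, List.foldl_cons]
    apply ih
    unfold pvAStep
    by_cases hreq : pvEventType e ∈ pvREQUIRED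
    · by_cases hcont : (d.contains (pvEventType e) : Bool)
      · simp [hreq, hcont, h]
      · rw [Bool.not_eq_true] at hcont
        have hnm : pvEventType e ∉ d.keys := by
          rw [← PySem.Dict.contains_iff_mem_keys]; simp [hcont]
        simp only [hcont]
        rw [if_pos (by simpa using hreq)]
        simp only [Bool.not_false, if_true]
        rw [PySem.Dict.keys_insert_of_not_contains (h := hcont)]
        rw [List.nodup_append]
        refine ⟨h, List.nodup_singleton _, ?_⟩
        intro a ha b hb
        rw [List.mem_singleton] at hb
        subst hb
        exact fun hab => hnm (hab ▸ ha)
    · simp [hreq, h]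

theorem pvFirsts_eq_none (L : List (List (String × String))) :
    ∀ ts : List String, (∃ t ∈ ts, pvFindFirst t L 0 = none) → pvFirsts L ts = none := by
  intro ts
  induction ts with
  | nil => simp
  | cons t ts ih =>
    rintro ⟨u, hu, hnone⟩
    unfold pvFirsts
    rcases List.mem_cons.mp hu with hu1 | hu2
    · subst hu1; rw [hnone]
    · cases hf : pvFindFirst t L 0 with
      | none => rfl
      | some i => rw [ih ⟨u, hu2, hnone⟩]; rfl

theorem verify_eq_alt (L : List (List (String × String))) :
    verify_closure_sequence L = verify_closure_sequence_alt L := by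
  have hget : ∀ t, ((PySem.List.enumerate L).foldl pvAStep PySem.Dict.empty).get? t
      = if t ∈ pvREQUIRED then pvFindFirst t L 0 else none := by
    intro t
    rw [foldA_get t L PySem.Dict.empty 0]
    simp [PySem.Dict.get?_empty]
  have hnodup : ((PySem.List.enumerate L).foldl pvAStep PySem.Dict.empty).keys.Nodup := by
    apply foldA_nodup
    simp [PySem.Dict.keys_empty]
  have hmem : ∀ t, t ∈ ((PySem.List.enumerate L).foldl pvAStep PySem.Dict.empty).keys
      ↔ (t ∈ pvREQUIRED ∧ (pvFindFirst t L 0).isSome) := by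
    intro t
    rw [← not_iff_not, ← PySem.Dict.get?_eq_none_iff_not_mem_keys, hget]
    by_cases ht : t ∈ pvREQUIRED
    · simp [ht, Option.isSome_iff_ne_none]
    · simp [ht]
  have hsizelen : ((PySem.List.enumerate L).foldl pvAStep PySem.Dict.empty).size
      = ((PySem.List.enumerate L).foldl pvAStep PySem.Dict.empty).keys.length := by
    simp [PySem.Dict.size, PySem.Dict.keys]
  have hperm : ((PySem.List.enumerate L).foldl pvAStep PySem.Dict.empty).keys.Perm
      (pvREQUIRED.filter (fun t => (pvFindFirst t L 0).isSome)) := by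
    rw [List.perm_ext_iff_of_nodup hnodup (List.Nodup.filter _ (by decide))]
    intro a
    rw [hmem, List.mem_filter]
  by_cases hall : ∀ t ∈ pvREQUIRED, (pvFindFirst t L 0).isSome
  · -- all present
    have hfilter : pvREQUIRED.filter (fun t => (pvFindFirst t L 0).isSome) = pvREQUIRED :=
      List.filter_eq_self.mpr (fun t ht => hall t ht)
    have hsize : ((PySem.List.enumerate L).foldl pvAStep PySem.Dict.empty).size = pvREQUIRED.length := by
      rw [hsizelen, hperm.length_eq, hfilter]
    have h0 := hall "METRIC_DEFINITION_ANCHORED" (by decide)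
    have h1 := hall "SHADOW_METRIC_DEPLOYED" (by decide)
    have h2 := hall "GOODHART_DIV_GATE_ARMED" (by decide)
    have h3 := hall "SYNTHETIC_GOODHART_ATTACK_LAUNCHED" (by decide)
    have h4 := hall "GOODHART_DIVERGENCE_DETECTED" (by decide)
    have h5 := hall "FEATURE_FREEZE_EXECUTED" (by decide)
    have h6 := hall "7956_TRIGGERED" (by decide)
    obtain ⟨v0, hv0⟩ := Option.isSome_iff_exists.mp h0
    obtain ⟨v1, hv1⟩ := Option.isSome_iff_exists.mp h1
    obtain ⟨v2, hv2⟩ := Option.isSome_iff_exists.mp h2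
    obtain ⟨v3, hv3⟩ := Option.isSome_iff_exists.mp h3
    obtain ⟨v4, hv4⟩ := Option.isSome_iff_exists.mp h4
    obtain ⟨v5, hv5⟩ := Option.isSome_iff_exists.mp h5
    obtain ⟨v6, hv6⟩ := Option.isSome_iff_exists.mp h6
    have hB : verify_closure_sequence_alt L
        = (decide (v0 < v1) && decide (v1 < v2) && decide (v2 < v3) && decide (v3 < v4)
            && decide (v4 < v5) && decide (v5 < v6)) := by
      unfold verify_closure_sequence_alt
      simp only [pvREQUIRED, pvFirsts, hv0, hv1, hv2, hv3, hv4, hv5, hv6, Option.map_some]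
      simp [List.zip, List.zipWith, Bool.and_assoc]
    have g0 : ∀ dflt, ((PySem.List.enumerate L).foldl pvAStep PySem.Dict.empty).getD "METRIC_DEFINITION_ANCHORED" dflt = v0 := by
      intro dflt; rw [PySem.Dict.getD_eq_get?_getD, hget, if_pos (by decide), hv0]; rfl
    have g1 : ∀ dflt, ((PySem.List.enumerate L).foldl pvAStep PySem.Dict.empty).getD "SHADOW_METRIC_DEPLOYED" dflt = v1 := by
      intro dflt; rw [PySem.Dict.getD_eq_get?_getD, hget, if_pos (by decide), hv1]; rfl
    have g2 : ∀ dflt, ((PySem.List.enumerate L).foldl pvAStep PySem.Dict.empty).getD "GOODHART_DIV_GATE_ARMED" dflt = v2 := by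
      intro dflt; rw [PySem.Dict.getD_eq_get?_getD, hget, if_pos (by decide), hv2]; rfl
    have g3 : ∀ dflt, ((PySem.List.enumerate L).foldl pvAStep PySem.Dict.empty).getD "SYNTHETIC_GOODHART_ATTACK_LAUNCHED" dflt = v3 := by
      intro dflt; rw [PySem.Dict.getD_eq_get?_getD, hget, if_pos (by decide), hv3]; rfl
    have g4 : ∀ dflt, ((PySem.List.enumerate L).foldl pvAStep PySem.Dict.empty).getD "GOODHART_DIVERGENCE_DETECTED" dflt = v4 := by
      intro dflt; rw [PySem.Dict.getD_eq_get?_getD, hget, if_pos (by decide), hv4]; rfl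
    have g5 : ∀ dflt, ((PySem.List.enumerate L).foldl pvAStep PySem.Dict.empty).getD "FEATURE_FREEZE_EXECUTED" dflt = v5 := by
      intro dflt; rw [PySem.Dict.getD_eq_get?_getD, hget, if_pos (by decide), hv5]; rfl
    have g6 : ∀ dflt, ((PySem.List.enumerate L).foldl pvAStep PySem.Dict.empty).getD "7956_TRIGGERED" dflt = v6 := by
      intro dflt; rw [PySem.Dict.getD_eq_get?_getD, hget, if_pos (by decide), hv6]; rfl
    have hrange : PySem.List.pyRange 0 ((pvREQUIRED.length : Int) - 1) 1 = [0, 1, 2, 3, 4, 5] := by decide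
    have hA : verify_closure_sequence L
        = (decide (v0 < v1) && decide (v1 < v2) && decide (v2 < v3) && decide (v3 < v4)
            && decide (v4 < v5) && decide (v5 < v6)) := by
      unfold verify_closure_sequence
      rw [if_neg (by simp [hsize]), hrange]
      simp only [List.all_cons, List.all_nil, Bool.and_true]
      norm_num [PySem.List.pyGet?, PySem.List.pyIdx?, pvREQUIRED, (show Int.toNat 2 = 2 from rfl), (show Int.toNat 3 = 3 from rfl), (show Int.toNat 4 = 4 from rfl), (show Int.toNat 5 = 5 from rfl), (show Int.toNat 6 = 6 from rfl)]
      simp only [g0, g1, g2, g3, g4, g5, g6]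
      have bool_ge : ∀ a b : Int, (!decide (b ≤ a)) = decide (a < b) := by
        intro a b
        by_cases h : b ≤ a
        · rw [decide_eq_true h]
          simp only [Bool.not_true]
          exact (decide_eq_false (by omega)).symm
        · rw [decide_eq_false h]
          simp only [Bool.not_false]
          exact (decide_eq_true (by omega)).symm
      simp only [bool_ge, Bool.and_assoc]
    rw [hA, hB]
  · -- some type missing
    rw [not_forall] at hall
    obtain ⟨t0, ht0all⟩ := hall
    rw [Classical.not_imp] at ht0all
    obtain ⟨ht0, hmiss⟩ := ht0all
    have hmiss' : pvFindFirst t0 L 0 = none := by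
      cases h : pvFindFirst t0 L 0 with
      | none => rfl
      | some v => rw [h] at hmiss; simp at hmiss
    have hlen : (pvREQUIRED.filter (fun t => (pvFindFirst t L 0).isSome)).length ≠ pvREQUIRED.length := by
      intro hcon
      have := (List.length_filter_eq_length_iff).mp hcon t0 ht0
      simp [hmiss'] at this
    have hsize : ((PySem.List.enumerate L).foldl pvAStep PySem.Dict.empty).size ≠ pvREQUIRED.length := by
      rw [hsizelen, hperm.length_eq]; exact hlen
    have hB : verify_closure_sequence_alt L = false := by
      unfold verify_closure_sequence_alt
      rw [pvFirsts_eq_none L pvREQUIRED ⟨t0, ht0, hmiss'⟩]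
    have hA : verify_closure_sequence L = false := by
      unfold verify_closure_sequence
      simp only [if_pos hsize]
    rw [hA, hB]

-- ===== VERDICT (by name: the statement is the Claim_ definition above) =====
theorem verify_closure_sequence_spec : Claim_equal_verify_closure_sequence := by
  intro ledger_events _
  unfold Spec_verify_closure_sequence
  exact verify_eq_alt ledger_events
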